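-- pv_equiv track=rewrite | github.com/juandarr/ProjectEuler | 115.py | block_counting
-- ===== SOURCE A (Python) =====
-- def block_counting(m):
--     '''
--     returns the least value of n for which the variations exceeds one million
--     '''
--     n = m
--     variations = {}
--     while True:
--         counter = 1
--         for block in range(m,n+1):
--             for idx in range(n-block+1):
--                 counter +=1
--                 if n-(block+idx+1)>=m:
--                     counter += variations[n-(block+idx+1)]
--         variations[n]=counter-1
--         if counter>10**6:
--             return n
--         n +=1
--     return counter
-- ===== SOURCE B (Python) =====
-- def block_counting(m):
--     '''
--     returns the least value of n for which the variations exceeds one million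
--     '''
--     ways = []   # ways[i] = number of non-empty fillings of a row of length m+i
--     n = m
--     prev = 0    # ways of previous length
--     s = 0       # sum of ways[k-m] for m <= k <= n-m-1 (running prefix sum)
--     while True:
--         if n - m - 1 >= m:
--             s += ways[n - m - 1 - m]
--         cur = prev + (n - m + 1) + s
--         ways.append(cur)
--         if cur + 1 > 10**6:
--             return n
--         prev = cur
--         n += 1
-- ===== Notes on version B (the rewrite author's own statement) =====
-- stated objective: faster
-- what changed: Replaced the memoized triple-nested counting loop (for each row length, re-summing over all block sizes and positions) by a first-difference linear recurrence ways(n) = ways(n-1) + (n-m+1) + S, where S is an incrementally maintained prefix sum of earlier ways values, iterated once per row length.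
import Mathlib
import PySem

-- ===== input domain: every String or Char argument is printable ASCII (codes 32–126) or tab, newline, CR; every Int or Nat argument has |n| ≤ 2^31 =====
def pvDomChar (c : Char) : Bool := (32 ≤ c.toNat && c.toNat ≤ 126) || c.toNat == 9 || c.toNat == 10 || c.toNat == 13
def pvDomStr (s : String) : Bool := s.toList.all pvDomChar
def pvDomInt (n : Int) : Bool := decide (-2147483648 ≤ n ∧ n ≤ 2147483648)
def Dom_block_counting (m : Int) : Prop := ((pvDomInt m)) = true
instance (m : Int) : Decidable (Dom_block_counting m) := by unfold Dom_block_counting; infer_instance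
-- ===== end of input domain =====

-- B replaces A's memoized triple-nested counting loop by a linear first-difference recurrence
-- with a running prefix sum (objective: faster, asymptotically).

-- ===== PORT A =====
-- the counter value after the two nested 'for' loops at row length n, given the memo dict
def blockCountingInner (m n : Int) (variations : PySem.Dict Int Int) : Int :=
  (PySem.List.pyRange m (n + 1) 1).foldl (fun counter block =>
    (PySem.List.pyRange 0 (n - block + 1) 1).foldl (fun counter idx =>
      let counter := counter + 1
      if n - (block + idx + 1) ≥ m then
        -- Python 'variations[k]': the key is always present here for m ≥ 0 (no KeyError)
        counter + ((variations.get? (n - (block + idx + 1))).getD 0)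
      else counter) counter) 1

-- the 'while True' loop; the fuel only bounds the iterations (1500 always suffices: the
-- counter exceeds 10^6 after at most ~1414 iterations); fuel exhaustion returns n
def blockCountingLoop (m : Int) : ℕ → Int → PySem.Dict Int Int → Int
  | 0, n, _ => n
  | fuel + 1, n, variations =>
    let counter := blockCountingInner m n variations
    let variations := variations.insert n (counter - 1)
    if counter > 10 ^ 6 then n
    else blockCountingLoop m fuel (n + 1) variations

def block_counting (m : Int) : Int := blockCountingLoop m 1500 m PySem.Dict.empty

-- ===== PORT B =====
-- B's 'while True' loop: state (ways, prev, s); same fuel bound as A's port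
def blockCountingAltLoop (m : Int) : ℕ → Int → List Int → Int → Int → Int
  | 0, n, _, _, _ => n
  | fuel + 1, n, ways, prev, s =>
    let s := if n - m - 1 ≥ m then s + ((PySem.List.pyGet? ways (n - m - 1 - m)).getD 0) else s
    let cur := prev + (n - m + 1) + s
    let ways := ways ++ [cur]
    if cur + 1 > 10 ^ 6 then n
    else blockCountingAltLoop m fuel (n + 1) ways cur s

def block_counting_alt (m : Int) : Int := blockCountingAltLoop m 1500 m [] 0 0

-- ===== PRECONDITION & SPEC =====
-- Pre_ excludes negative m, where Python A raises KeyError (and Python B raises IndexError)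
def Pre_block_counting (m : Int) : Prop := 0 ≤ m
instance (m : Int) : Decidable (Pre_block_counting m) := by unfold Pre_block_counting; infer_instance
def pvWitness_block_counting : Int := (3)

def Spec_block_counting (m : Int) (out : Int) : Prop := out = block_counting_alt m
instance (m : Int) (out : Int) : Decidable (Spec_block_counting m out) := by unfold Spec_block_counting; infer_instance

-- ===== CLAIM (what is proved, stated in full; the proofs are below) =====
def Claim_equal_block_counting : Prop := ∀ (m : Int), Dom_block_counting m → Pre_block_counting m → Spec_block_counting m (block_counting m)

-- ===== LEMMAS AND PROOFS =====

-- the common mathematical sequence: wseq M i = number of non-empty block fillings (blocks of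
-- length ≥ M, separated by gaps) of a row of length M + i, as both programs tabulate it
def wseq (M : ℕ) : ℕ → ℤ
  | 0 => 1
  | i + 1 => wseq M i + (i + 2) + (((List.range (i + 1 - M)).attach.map (fun j => wseq M j.1)).sum)
  decreasing_by all_goals first | exact Nat.lt_succ_self _ | (have := List.mem_range.mp j.2; omega)

lemma sum_map_range (f : ℕ → ℤ) (n : ℕ) :
    ((List.range n).map f).sum = ∑ j ∈ Finset.range n, f j := by
  induction n with
  | zero => simp
  | succ n ih => rw [List.range_succ, Finset.sum_range_succ]; simp [ih]

lemma wseq_zero (M : ℕ) : wseq M 0 = 1 := by rw [wseq]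

lemma wseq_succ (M : ℕ) (i : ℕ) :
    wseq M (i + 1) = wseq M i + (i + 2) + ∑ j ∈ Finset.range (i + 1 - M), wseq M j := by
  rw [wseq]
  simp [sum_map_range]

lemma sum_ite_range (f : ℕ → ℤ) (c n : ℕ) (hc : c ≤ n) :
    ∑ k ∈ Finset.range n, (if k < c then f k else 0) = ∑ k ∈ Finset.range c, f k := by
  rw [← Finset.sum_filter]
  congr 1
  ext k
  simp only [Finset.mem_filter, Finset.mem_range]
  omega

-- the sum of the per-block contributions telescopes to wseq
lemma sum_g (M i : ℕ) :
    ∑ t ∈ Finset.range (i + 1), (((t : ℤ) + 1) + ∑ j ∈ Finset.range (t - M), wseq M j)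
      = wseq M i := by
  induction i with
  | zero => simp [wseq_zero]
  | succ i ih =>
    rw [Finset.sum_range_succ, ih, wseq_succ]
    push_cast
    ring

-- inner fold over idx for one block value m+b: adds (i-b+1) plus the memo values below
lemma inner_fold_eq (M i b : ℕ) (hb : b ≤ i) (d : PySem.Dict Int Int)
    (hd : ∀ j : ℕ, j < i → d.get? ((M : Int) + j) = some (wseq M j)) (c0 : Int) :
    (PySem.List.pyRange 0 (((M : Int) + i) - ((M : Int) + b) + 1) 1).foldl (fun counter idx =>
      let counter := counter + 1
      if ((M : Int) + i) - (((M : Int) + b) + idx + 1) ≥ (M : Int) then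
        counter + ((d.get? (((M : Int) + i) - (((M : Int) + b) + idx + 1))).getD 0)
      else counter) c0
    = c0 + ((((i - b : ℕ) : ℤ) + 1) + ∑ j ∈ Finset.range (i - b - M), wseq M j) := by
  have hT : ((M : Int) + i) - ((M : Int) + b) + 1 = (((i - b) + 1 : ℕ) : ℤ) := by omega
  rw [hT, PySem.List.pyRange_zero_natCast, List.foldl_map]
  have hfun : (fun (x : Int) (y : ℕ) =>
        (fun (counter : Int) (idx : Int) =>
          let counter := counter + 1
          if ((M : Int) + i) - (((M : Int) + b) + idx + 1) ≥ (M : Int) then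
            counter + ((d.get? (((M : Int) + i) - (((M : Int) + b) + idx + 1))).getD 0)
          else counter) x ((y : Int)))
      = (fun (c : Int) (k : ℕ) => c +
          (1 + if k < i - b - M then wseq M (i - b - M - 1 - k) else 0)) := by
    funext acc k
    by_cases hcond : ((M : Int) + i) - (((M : Int) + b) + (k : Int) + 1) ≥ (M : Int)
    · have hlt : k < i - b - M := by omega
      have hkey : ((M : Int) + i) - (((M : Int) + b) + (k : Int) + 1)
          = (M : Int) + ((i - b - M - 1 - k : ℕ) : ℤ) := by omega
      simp only [hkey, hd (i - b - M - 1 - k) (by omega), Option.getD_some, if_pos hlt]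
      split_ifs with hI
      · ring
      · exact absurd (by omega) hI
    · have hlt : ¬ (k < i - b - M) := by omega
      simp only [if_neg hcond, if_neg hlt]
      ring
  have hrest : List.foldl (fun (c : Int) (k : ℕ) => c +
        (1 + if k < i - b - M then wseq M (i - b - M - 1 - k) else 0)) c0
        (List.range (i - b + 1))
      = c0 + ((((i - b : ℕ) : ℤ) + 1) + ∑ j ∈ Finset.range (i - b - M), wseq M j) := by
    rw [PySem.List.foldl_add, sum_map_range]
    rw [Finset.sum_add_distrib, Finset.sum_const, sum_ite_range _ _ _ (by omega)]
    rw [Finset.sum_range_reflect (fun j => wseq M j) (i - b - M)]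
    simp only [Finset.card_range]
    ring
  exact (congrArg (fun φ => List.foldl φ c0 (List.range (i - b + 1))) hfun).trans hrest

-- the whole double fold computes 1 + wseq M i
lemma counter_eq (M i : ℕ) (d : PySem.Dict Int Int)
    (hd : ∀ j : ℕ, j < i → d.get? ((M : Int) + j) = some (wseq M j)) :
    blockCountingInner (M : Int) ((M : Int) + i) d = 1 + wseq M i := by
  unfold blockCountingInner
  have hR : ((M : Int) + i + 1) - (M : Int) = ((i + 1 : ℕ) : ℤ) := by push_cast; ring
  rw [PySem.List.pyRange_one, hR]
  rw [Int.toNat_natCast, List.foldl_map]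
  have hcongr := PySem.List.foldl_congr_mem
    (l := List.range (i + 1)) (init := (1 : Int))
    (f := fun (x : Int) (y : ℕ) =>
      (fun (counter : Int) (block : Int) =>
        List.foldl (fun (counter : Int) (idx : Int) =>
          let counter := counter + 1
          if ((M : Int) + i) - (block + idx + 1) ≥ (M : Int) then
            counter + ((d.get? (((M : Int) + i) - (block + idx + 1))).getD 0)
          else counter) counter
          (PySem.List.pyRange 0 (((M : Int) + i) - block + 1) 1)) x ((M : Int) + (y : Int)))
    (g := fun (c : Int) (b : ℕ) => c +
      ((((i - b : ℕ) : ℤ) + 1) + ∑ j ∈ Finset.range (i - b - M), wseq M j))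
    (by
      intro acc b hb
      have hb' : b ≤ i := by have := List.mem_range.mp hb; omega
      exact inner_fold_eq M i b hb' d hd acc)
  refine (hcongr.trans ?_)
  rw [PySem.List.foldl_add, sum_map_range]
  have hrefl := Finset.sum_range_reflect
    (fun t => (((t : ℕ) : ℤ) + 1) + ∑ j ∈ Finset.range (t - M), wseq M j) (i + 1)
  simp only [Nat.add_sub_cancel] at hrefl
  rw [hrefl, sum_g]

-- the two loops agree step by step
lemma loops_agree (M : ℕ) : ∀ (fuel : ℕ) (i : ℕ) (d : PySem.Dict Int Int),
    (∀ j : ℕ, j < i → d.get? ((M : Int) + j) = some (wseq M j)) →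
    blockCountingLoop (M : Int) fuel ((M : Int) + i) d
      = blockCountingAltLoop (M : Int) fuel ((M : Int) + i)
          ((List.range i).map (wseq M))
          (if i = 0 then 0 else wseq M (i - 1))
          (∑ j ∈ Finset.range (i - 1 - M), wseq M j) := by
  intro fuel
  induction fuel with
  | zero => intro i d _; rfl
  | succ fuel ih =>
    intro i d hd
    have hcounter := counter_eq M i d hd
    simp only [blockCountingLoop, blockCountingAltLoop, hcounter]
    -- B's updated prefix sum
    have hs' : (if ((M : Int) + i) - M - 1 ≥ (M : Int) then
          (∑ j ∈ Finset.range (i - 1 - M), wseq M j) +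
            ((PySem.List.pyGet? ((List.range i).map (wseq M)) (((M : Int) + i) - M - 1 - M)).getD 0)
        else (∑ j ∈ Finset.range (i - 1 - M), wseq M j))
        = ∑ j ∈ Finset.range (i - M), wseq M j := by
      by_cases hMi : (M : Int) + i - M - 1 ≥ (M : Int)
      · have hidx : ((M : Int) + i) - M - 1 - M = ((i - 1 - M : ℕ) : ℤ) := by omega
        rw [if_pos hMi, hidx, PySem.List.pyGet?_natCast]
        rw [List.getElem?_map, List.getElem?_range (by omega : i - 1 - M < i)]
        simp only [Option.map_some, Option.getD_some]
        rw [← Finset.sum_range_succ]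
        have heq : i - 1 - M + 1 = i - M := by omega
        rw [heq]
      · rw [if_neg hMi]
        have heq : i - 1 - M = i - M := by omega
        rw [heq]
    rw [hs']
    -- B's current value equals wseq M i
    have hcur : (if i = 0 then 0 else wseq M (i - 1)) + (((M : Int) + i) - M + 1) +
        (∑ j ∈ Finset.range (i - M), wseq M j) = wseq M i := by
      cases i with
      | zero => simp [wseq_zero]
      | succ i' =>
        rw [if_neg (Nat.succ_ne_zero i'), Nat.succ_sub_one, wseq_succ]
        push_cast
        ring
    rw [hcur]
    rw [show (1 : ℤ) + wseq M i - 1 = wseq M i by ring]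
    rw [Int.add_comm 1 (wseq M i)]
    by_cases hbig : wseq M i + 1 > 10 ^ 6
    · rw [if_pos hbig, if_pos hbig]
    · rw [if_neg hbig, if_neg hbig]
      have hd' : ∀ j : ℕ, j < i + 1 →
          (d.insert ((M : Int) + i) (wseq M i)).get? ((M : Int) + j) = some (wseq M j) := by
        intro j hj
        rw [PySem.Dict.get?_insert]
        by_cases hji : j = i
        · subst hji
          rw [if_pos rfl]
        · rw [if_neg (fun hE => hji (by omega))]
          exact hd j (by omega)
      have := ih (i + 1) (d.insert ((M : Int) + i) (wseq M i)) hd'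
      simp only [Nat.cast_add, Nat.cast_one, Nat.add_sub_cancel, Nat.succ_ne_zero,
        List.range_succ, List.map_append, List.map_cons, List.map_nil] at this
      rw [show ((M : Int) + i + 1) = (M : Int) + ((i : Int) + 1) by ring]
      exact this

-- ===== VERDICT (by name: the statement is the Claim_ definition above) =====
theorem block_counting_spec : Claim_equal_block_counting := by
  intro m _ hpre
  unfold Spec_block_counting block_counting block_counting_alt
  obtain ⟨M, rfl⟩ : ∃ M : ℕ, m = (M : Int) := ⟨m.toNat, (Int.toNat_of_nonneg hpre).symm⟩
  have h := loops_agree M 1500 0 PySem.Dict.empty (by intro j hj; omega)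
  simpa using h
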